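-- pv_equiv track=rewrite | github.com/alecstem/2022-REU-on-Smart-UAVs | Full_Code/bfsonframes.py | bfs
-- ===== SOURCE A (Python) =====
-- import queue
--
-- def bfs(matrix, matrix2, buffer):
--     visited = matrix2
--     # buffer
--     t = buffer
--     dirs = [[0, 1], [0, -1], [-1, 0], [1, 0]]
--     q = queue.Queue()
--     for i in range(len(matrix2)):
--         for j in range(len(matrix2[0])):
--             if matrix2[i][j] == 255:
--                 q.put([i, j])
--     while t > 0:
--         n = q.qsize()
--         while n > 0:
--             top = q.get()
--             matrix[top[0]][top[1]] = 255
--             for ddir in dirs: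
--                 x1 = top[0]+ddir[0]
--                 y1 = top[1]+ddir[1]
--                 if 0 <= x1 < len(matrix) and 0 <= y1 < len(matrix2[0]) and visited[x1][y1] == 0:
--                     q.put([x1, y1])
--                     visited[x1][y1] = 255
--             n = n-1
--         t = t-1
--     return matrix2
-- ===== SOURCE B (Python) =====
-- def bfs(matrix, matrix2, buffer):
--     # Morphological dilation: repeat up to `buffer` passes; each pass scans
--     # the grid, collects every 0-cell touching a 255-cell, marks them all,
--     # and stops early once a pass adds nothing.  Mutates matrix2 in place
--     # and returns it; `matrix` is not touched.
--     if buffer <= 0 or not matrix2: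
--         return matrix2
--     rows = len(matrix2)
--     cols = len(matrix2[0])
--     nbrs = ((0, 1), (0, -1), (-1, 0), (1, 0))
--     for _ in range(buffer):
--         additions = [
--             (i, j)
--             for i in range(rows)
--             for j in range(cols)
--             if matrix2[i][j] == 0
--             and any(
--                 0 <= i + di < rows and 0 <= j + dj < cols
--                 and matrix2[i + di][j + dj] == 255
--                 for di, dj in nbrs
--             )
--         ]
--         if not additions:
--             break
--         for i, j in additions:
--             matrix2[i][j] = 255
--     return matrix2
-- ===== Notes on version B (the rewrite author's own statement) =====
-- stated objective: faster
-- what changed: Replaces the FIFO-queue level-by-level BFS with whole-grid morphological dilation passes that stop as soon as a pass adds nothing (A keeps spinning through all `buffer` rounds even after the queue empties); equivalence is about the returned matrix2 only: B does not reproduce A's in-place marking of the non-returned `matrix` argument; Pre_bfs additionally excludes ragged grids on which A's indexing raises IndexError.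
-- outside the precondition, e.g. on bfs([[255]], [[255], [0]], 1): A returns [[255], [0]], B returns [[255], [255]]; on bfs([[255]], [[255], [7]], 1): A returns [[255], [7]], B returns [[255], [7]]
import Mathlib
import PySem

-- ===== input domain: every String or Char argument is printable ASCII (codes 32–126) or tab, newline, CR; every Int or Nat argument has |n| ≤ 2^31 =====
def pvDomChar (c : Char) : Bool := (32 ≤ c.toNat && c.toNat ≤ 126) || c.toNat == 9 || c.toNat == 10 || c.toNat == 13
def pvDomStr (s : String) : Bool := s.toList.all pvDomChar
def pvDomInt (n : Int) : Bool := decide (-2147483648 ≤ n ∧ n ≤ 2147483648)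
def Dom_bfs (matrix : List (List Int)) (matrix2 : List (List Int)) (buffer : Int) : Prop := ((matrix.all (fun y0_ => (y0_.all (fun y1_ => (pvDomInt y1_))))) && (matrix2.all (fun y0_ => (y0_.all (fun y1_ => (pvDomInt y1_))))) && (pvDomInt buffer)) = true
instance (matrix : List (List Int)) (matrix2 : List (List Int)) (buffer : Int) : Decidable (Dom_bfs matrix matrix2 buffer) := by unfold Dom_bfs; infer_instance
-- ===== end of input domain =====

-- B replaces the queue-based layered BFS by whole-grid morphological dilation
-- passes that stop once a pass adds nothing (measured faster for large buffers).
-- Python A mutates both `matrix` and `matrix2` in place and returns `matrix2`;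
-- B mutates only `matrix2`; the equivalence proved here is about the RETURNED
-- value (matrix2) only — B does not reproduce A's marking of `matrix`.

-- ===== PORT A =====
-- 2D read/write helpers. Exact for the nonnegative in-range accesses both
-- ports perform on inputs satisfying Pre_bfs (Python raises on reads outside
-- the row, which Pre_bfs excludes; all indices are guarded nonnegative).
def pvGet2 (v : List (List Int)) (x y : Int) : Int := (v.getD x.toNat []).getD y.toNat 0

def pvSet2 (v : List (List Int)) (x y : Int) (c : Int) : List (List Int) :=
  v.modify x.toNat (fun r => r.set y.toNat c)

def dirsA : List (Int × Int) := [(0, 1), (0, -1), (-1, 0), (1, 0)]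

-- the initial queue fill: every 255-cell of matrix2, row-major
def bfsSeeds (m2 : List (List Int)) : List (Int × Int) :=
  (List.range m2.length).flatMap (fun (i : Nat) =>
    (List.range (m2.headD []).length).filterMap (fun (j : Nat) =>
      if pvGet2 m2 (i : Int) (j : Int) = 255 then some ((i : Int), (j : Int)) else none))

-- body of A's `for ddir in dirs` loop; state = (matrix, visited, queue)
def bfsStep (top : Int × Int)
    (s : List (List Int) × List (List Int) × List (Int × Int)) (d : Int × Int) :
    List (List Int) × List (List Int) × List (Int × Int) :=
  if 0 ≤ top.1 + d.1 ∧ top.1 + d.1 < (s.1.length : Int) ∧ 0 ≤ top.2 + d.2 ∧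
      top.2 + d.2 < ((s.2.1.headD []).length : Int) ∧ pvGet2 s.2.1 (top.1 + d.1) (top.2 + d.2) = 0
  then (s.1, pvSet2 s.2.1 (top.1 + d.1) (top.2 + d.2) 255, s.2.2 ++ [(top.1 + d.1, top.2 + d.2)])
  else s

-- one popped cell: matrix[top] := 255, then the four neighbour checks
def bfsCell (m v : List (List Int)) (q : List (Int × Int)) (top : Int × Int) :
    List (List Int) × List (List Int) × List (Int × Int) :=
  dirsA.foldl (bfsStep top) (pvSet2 m top.1 top.2 255, v, q)

-- A's inner `while n > 0` loop (n = queue size at round start, so the queue is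
-- never empty when popped; the [] branch is unreachable)
def bfsLevel (m v : List (List Int)) (q : List (Int × Int)) :
    Nat → List (List Int) × List (List Int) × List (Int × Int)
  | 0 => (m, v, q)
  | n + 1 =>
    match q with
    | [] => (m, v, q)
    | top :: rest =>
      let s := bfsCell m v rest top
      bfsLevel s.1 s.2.1 s.2.2 n

-- A's outer `while t > 0` loop
def bfsRounds (m v : List (List Int)) (q : List (Int × Int)) :
    Nat → List (List Int) × List (List Int) × List (Int × Int)
  | 0 => (m, v, q)
  | t + 1 =>
    let s := bfsLevel m v q q.length
    bfsRounds s.1 s.2.1 s.2.2 t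

def bfs (matrix : List (List Int)) (matrix2 : List (List Int)) (buffer : Int) : List (List Int) :=
  (bfsRounds matrix matrix2 (bfsSeeds matrix2) buffer.toNat).2.1

-- ===== PORT B =====
-- Source B's `any(...)`: does cell (i,j) touch a currently-255 cell?
def nbr255 (v : List (List Int)) (rows cols : Nat) (i j : Nat) : Bool :=
  dirsA.any (fun d =>
    decide (0 ≤ (i : Int) + d.1) && decide ((i : Int) + d.1 < (rows : Int)) &&
    decide (0 ≤ (j : Int) + d.2) && decide ((j : Int) + d.2 < (cols : Int)) &&
    (pvGet2 v ((i : Int) + d.1) ((j : Int) + d.2) == 255))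

-- the `additions` comprehension of one pass
def passAdds (v : List (List Int)) (rows cols : Nat) : List (Int × Int) :=
  (List.range rows).flatMap (fun (i : Nat) =>
    (List.range cols).filterMap (fun (j : Nat) =>
      if pvGet2 v (i : Int) (j : Int) = 0 ∧ nbr255 v rows cols i j = true then
        some ((i : Int), (j : Int)) else none))

-- `for i, j in additions: matrix2[i][j] = 255`
def applyAdds (v : List (List Int)) (l : List (Int × Int)) : List (List Int) :=
  l.foldl (fun w p => pvSet2 w p.1 p.2 255) v

-- the `for _ in range(buffer)` loop with its early `break`
def passLoop (v : List (List Int)) (rows cols : Nat) : Nat → List (List Int)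
  | 0 => v
  | fuel + 1 =>
    let adds := passAdds v rows cols
    let v1 := applyAdds v adds
    if adds = [] then v1 else passLoop v1 rows cols fuel

def bfs_alt (matrix : List (List Int)) (matrix2 : List (List Int)) (buffer : Int) : List (List Int) :=
  if buffer ≤ 0 ∨ matrix2 = [] then matrix2
  else passLoop matrix2 matrix2.length (matrix2.headD []).length buffer.toNat

-- ===== PRECONDITION & SPEC =====
-- Pre_bfs admits: empty matrix2; any matrix2 whose rows are at least as long as
-- row 0 when buffer ≤ 0 or when no seed (255 within the first row-0-length
-- columns) exists (A then returns without ever touching `matrix`); and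
-- otherwise grids where `matrix` has matrix2's row count and rows at least as
-- long. Whether A survives a malformed region otherwise depends on which cells
-- the BFS actually reaches — not closed-form — so Pre_bfs over-excludes some
-- mismatched-shape inputs on which A happens to return (see claim cites).
def Pre_bfs (matrix : List (List Int)) (matrix2 : List (List Int)) (buffer : Int) : Prop :=
  matrix2 = [] ∨
    ((∀ r ∈ matrix2, (matrix2.headD []).length ≤ r.length) ∧
      (buffer ≤ 0 ∨
        (∀ r ∈ matrix2, ∀ k < (matrix2.headD []).length, r.getD k 0 ≠ 255) ∨
        (matrix.length = matrix2.length ∧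
          ∀ r ∈ matrix, (matrix2.headD []).length ≤ r.length)))

instance (matrix : List (List Int)) (matrix2 : List (List Int)) (buffer : Int) :
    Decidable (Pre_bfs matrix matrix2 buffer) := by unfold Pre_bfs; infer_instance

def pvWitness_bfs : List (List Int) × List (List Int) × Int :=
  ([[0, 0], [0, 0]], [[255, 0], [0, 0]], 1)

def Spec_bfs (matrix : List (List Int)) (matrix2 : List (List Int)) (buffer : Int) (out : List (List Int)) : Prop := out = bfs_alt matrix matrix2 buffer
instance (matrix : List (List Int)) (matrix2 : List (List Int)) (buffer : Int) (out : List (List Int)) : Decidable (Spec_bfs matrix matrix2 buffer out) := by unfold Spec_bfs; infer_instance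

-- ===== CLAIM (what is proved, stated in full; the proofs are below) =====
def Claim_equal_bfs : Prop := ∀ (matrix : List (List Int)) (matrix2 : List (List Int)) (buffer : Int), Dom_bfs matrix matrix2 buffer → Pre_bfs matrix matrix2 buffer → Spec_bfs matrix matrix2 buffer (bfs matrix matrix2 buffer)

-- ===== LEMMAS AND PROOFS =====

-- shape bookkeeping: same length and same row lengths
def Sh (v w : List (List Int)) : Prop :=
  v.length = w.length ∧ ∀ i : Nat, (v.getD i []).length = (w.getD i []).length

-- the shape invariant of the visited grid: R rows, row 0 of length C, no row
-- shorter than C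
def ShapeOf (R C : Nat) (v : List (List Int)) : Prop :=
  v.length = R ∧ (v.headD []).length = C ∧ ∀ r ∈ v, C ≤ r.length

-- (a,b) is a 4-neighbour of some queue member
def AdjQ (q : List (Int × Int)) (a b : Int) : Prop :=
  ∃ p ∈ q, ∃ d ∈ dirsA, a = p.1 + d.1 ∧ b = p.2 + d.2

-- the expansion condition A checks before pushing a cell, as a Bool
def stepCondB (R C : Nat) (v : List (List Int)) (t : Int × Int) : Bool :=
  decide (0 ≤ t.1) && decide (t.1 < (R : Int)) && decide (0 ≤ t.2) && decide (t.2 < (C : Int)) &&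
    (pvGet2 v t.1 t.2 == 0)

-- (a,b) is a 4-neighbour of some queue member, as a Bool
def adjQB (q : List (Int × Int)) (a b : Int) : Bool :=
  q.any (fun p => dirsA.any (fun d => a == p.1 + d.1 && b == p.2 + d.2))

lemma stepCondB_iff (R C : Nat) (v : List (List Int)) (t : Int × Int) :
    stepCondB R C v t = true ↔
      0 ≤ t.1 ∧ t.1 < (R : Int) ∧ 0 ≤ t.2 ∧ t.2 < (C : Int) ∧ pvGet2 v t.1 t.2 = 0 := by
  simp [stepCondB, and_assoc]

lemma adjQB_iff (q : List (Int × Int)) (a b : Int) :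
    adjQB q a b = true ↔ AdjQ q a b := by
  simp [adjQB, AdjQ, List.any_eq_true]

-- one morphological pass, as B performs it
def passF (R C : Nat) (w : List (List Int)) : List (List Int) := applyAdds w (passAdds w R C)

-- queue invariant: members are in-bounds 255 cells, and every expandable
-- 0-cell is adjacent to a queue member
def InvQ (R C : Nat) (v : List (List Int)) (q : List (Int × Int)) : Prop :=
  (∀ p ∈ q, 0 ≤ p.1 ∧ p.1 < (R : Int) ∧ 0 ≤ p.2 ∧ p.2 < (C : Int) ∧ pvGet2 v p.1 p.2 = 255) ∧
  (∀ a b : Int, 0 ≤ a → a < (R : Int) → 0 ≤ b → b < (C : Int) → pvGet2 v a b = 0 →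
    (∃ d ∈ dirsA, 0 ≤ a + d.1 ∧ a + d.1 < (R : Int) ∧ 0 ≤ b + d.2 ∧ b + d.2 < (C : Int) ∧
      pvGet2 v (a + d.1) (b + d.2) = 255) →
    AdjQ q a b)

lemma headD_eq_getD (v : List (List Int)) : v.headD [] = v.getD 0 [] := by
  cases v <;> rfl

lemma length_pvSet2 (v : List (List Int)) (x y c : Int) : (pvSet2 v x y c).length = v.length := by
  simp [pvSet2]

lemma sh_refl (v : List (List Int)) : Sh v v := ⟨rfl, fun _ => rfl⟩

lemma sh_trans {u v w : List (List Int)} (h1 : Sh u v) (h2 : Sh v w) : Sh u w :=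
  ⟨h1.1.trans h2.1, fun i => (h1.2 i).trans (h2.2 i)⟩

lemma sh_symm {v w : List (List Int)} (h : Sh v w) : Sh w v :=
  ⟨h.1.symm, fun i => (h.2 i).symm⟩

lemma sh_pvSet2 (v : List (List Int)) (x y c : Int) : Sh (pvSet2 v x y c) v := by
  constructor
  · simp [pvSet2]
  · intro k
    simp only [pvSet2, List.getD_eq_getElem?_getD, List.getElem?_modify]
    cases h : v[k]? <;> simp [h]
    split <;> simp

lemma shapeOf_of_sh {R C : Nat} {v w : List (List Int)} (h : Sh w v) (hv : ShapeOf R C v) :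
    ShapeOf R C w := by
  obtain ⟨hl, hr⟩ := h
  obtain ⟨hvl, hvh, hvr⟩ := hv
  refine ⟨hl.trans hvl, ?_, ?_⟩
  · rw [headD_eq_getD, hr 0, ← headD_eq_getD]; exact hvh
  · intro r hrmem
    obtain ⟨i, hi, rfl⟩ := List.mem_iff_getElem.1 hrmem
    have h1 : (w.getD i []).length = (v.getD i []).length := hr i
    rw [List.getD_eq_getElem _ _ hi] at h1
    have hiv : i < v.length := by omega
    rw [List.getD_eq_getElem _ _ hiv] at h1
    rw [h1]
    exact hvr _ (List.getElem_mem hiv)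

lemma pvGet2_pvSet2 {R C : Nat} {v : List (List Int)} (hv : ShapeOf R C v)
    {x y : Int} (hx0 : 0 ≤ x) (hxR : x < (R : Int)) (hy0 : 0 ≤ y) (hyC : y < (C : Int))
    (a b : Int) (ha : 0 ≤ a) (hb : 0 ≤ b) :
    pvGet2 (pvSet2 v x y 255) a b = if a = x ∧ b = y then 255 else pvGet2 v a b := by
  obtain ⟨hlen, hhead, hrows⟩ := hv
  have hxlt : x.toNat < v.length := by omega
  have hrowlen : C ≤ v[x.toNat].length := hrows _ (List.getElem_mem hxlt)
  by_cases hax : a = x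
  · subst hax
    have hrow : (pvSet2 v a y 255).getD a.toNat [] = v[a.toNat].set y.toNat 255 := by
      simp [pvSet2, List.getD_eq_getElem?_getD, List.getElem?_modify,
        List.getElem?_eq_getElem hxlt]
    by_cases hby : b = y
    · subst hby
      have : b.toNat < (v[a.toNat].set b.toNat 255).length := by
        simp only [List.length_set]; omega
      simp only [pvGet2, hrow]
      rw [List.getD_eq_getElem _ _ this]
      simp [List.getElem_set]
    · have hbn : b.toNat ≠ y.toNat := by omega
      simp only [pvGet2, hrow]
      rw [if_neg (fun hc => hby hc.2), List.getD_eq_getElem?_getD, List.getElem?_set,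
        if_neg (by omega : ¬ y.toNat = b.toNat), ← List.getD_eq_getElem?_getD,
        List.getD_eq_getElem _ _ hxlt]
  · have han : a.toNat ≠ x.toNat := by omega
    have hrow : (pvSet2 v x y 255).getD a.toNat [] = v.getD a.toNat [] := by
      simp only [pvSet2, List.getD_eq_getElem?_getD, List.getElem?_modify,
        if_neg (by omega : ¬ x.toNat = a.toNat)]
      cases h : v[a.toNat]? <;> simp [h]
    simp only [pvGet2, hrow]
    rw [if_neg (fun hc => hax hc.1)]

lemma sh_applyAdds (l : List (Int × Int)) : ∀ v, Sh (applyAdds v l) v := by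
  induction l with
  | nil => exact fun v => sh_refl v
  | cons p l ih =>
    intro v
    exact sh_trans (ih (pvSet2 v p.1 p.2 255)) (sh_pvSet2 v p.1 p.2 255)

lemma pvGet2_applyAdds {R C : Nat} (l : List (Int × Int)) :
    ∀ {v : List (List Int)}, ShapeOf R C v →
    (∀ p ∈ l, 0 ≤ p.1 ∧ p.1 < (R : Int) ∧ 0 ≤ p.2 ∧ p.2 < (C : Int)) →
    ∀ a b : Int, 0 ≤ a → 0 ≤ b →
      pvGet2 (applyAdds v l) a b = if (a, b) ∈ l then 255 else pvGet2 v a b := by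
  induction l with
  | nil => intro v _ _ a b _ _; simp [applyAdds]
  | cons p l ih =>
    intro v hv hmem a b ha hb
    obtain ⟨hp1, hp2, hp3, hp4⟩ := hmem p (List.mem_cons_self ..)
    have hv1 : ShapeOf R C (pvSet2 v p.1 p.2 255) :=
      shapeOf_of_sh (sh_pvSet2 v p.1 p.2 255) hv
    have step : applyAdds v (p :: l) = applyAdds (pvSet2 v p.1 p.2 255) l := rfl
    rw [step, ih hv1 (fun z hz => hmem z (List.mem_cons_of_mem _ hz)) a b ha hb,
      pvGet2_pvSet2 hv hp1 hp2 hp3 hp4 a b ha hb]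
    by_cases h1 : (a, b) ∈ l <;> by_cases h2 : a = p.1 ∧ b = p.2 <;>
      simp [List.mem_cons, h1, h2, Prod.ext_iff]

lemma grid_ext {v w : List (List Int)} (h : Sh v w)
    (hval : ∀ a b : Nat, pvGet2 v (a : Int) (b : Int) = pvGet2 w (a : Int) (b : Int)) : v = w := by
  apply List.ext_getElem h.1
  intro i h1 h2
  have hrl : v[i].length = w[i].length := by
    have := h.2 i
    rwa [List.getD_eq_getElem _ _ h1, List.getD_eq_getElem _ _ h2] at this
  apply List.ext_getElem hrl
  intro j hj1 hj2
  have := hval i j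
  simp only [pvGet2, Int.toNat_natCast] at this
  rwa [List.getD_eq_getElem _ _ h1, List.getD_eq_getElem _ _ h2,
    List.getD_eq_getElem _ _ hj1, List.getD_eq_getElem _ _ hj2] at this

lemma dirs_nodup : dirsA.Nodup := by decide

lemma dirs_neg : ∀ d ∈ dirsA, ((-d.1, -d.2) : Int × Int) ∈ dirsA := by decide

lemma nbr255_iff (v : List (List Int)) (rows cols : Nat) (i j : Nat) :
    nbr255 v rows cols i j = true ↔
      ∃ d ∈ dirsA, 0 ≤ (i : Int) + d.1 ∧ (i : Int) + d.1 < (rows : Int) ∧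
        0 ≤ (j : Int) + d.2 ∧ (j : Int) + d.2 < (cols : Int) ∧
        pvGet2 v ((i : Int) + d.1) ((j : Int) + d.2) = 255 := by
  simp [nbr255, List.any_eq_true, Bool.and_eq_true, decide_eq_true_eq, beq_iff_eq, and_assoc]

lemma mem_passAdds {R C : Nat} {v : List (List Int)} {z : Int × Int} :
    z ∈ passAdds v R C ↔
      0 ≤ z.1 ∧ z.1 < (R : Int) ∧ 0 ≤ z.2 ∧ z.2 < (C : Int) ∧ pvGet2 v z.1 z.2 = 0 ∧
        ∃ d ∈ dirsA, 0 ≤ z.1 + d.1 ∧ z.1 + d.1 < (R : Int) ∧ 0 ≤ z.2 + d.2 ∧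
          z.2 + d.2 < (C : Int) ∧ pvGet2 v (z.1 + d.1) (z.2 + d.2) = 255 := by
  simp only [passAdds, List.mem_flatMap, List.mem_filterMap, List.mem_range]
  constructor
  · rintro ⟨i, hi, j, hj, hif⟩
    split at hif
    · rename_i hcond
      obtain ⟨rfl⟩ := Option.some_inj.1 hif
      obtain ⟨h0, hn⟩ := hcond
      rw [nbr255_iff] at hn
      dsimp only
      refine ⟨by positivity, by exact_mod_cast hi, by positivity, by exact_mod_cast hj, h0, hn⟩
    · exact absurd hif (by simp)
  · rintro ⟨h1, h2, h3, h4, h5, h6⟩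
    refine ⟨z.1.toNat, by omega, z.2.toNat, by omega, ?_⟩
    have e1 : ((z.1.toNat : Nat) : Int) = z.1 := Int.toNat_of_nonneg h1
    have e2 : ((z.2.toNat : Nat) : Int) = z.2 := Int.toNat_of_nonneg h3
    rw [e1, e2, if_pos ⟨h5, (nbr255_iff ..).2 (by rw [e1, e2]; exact h6)⟩]

lemma mem_seeds {m2 : List (List Int)} {z : Int × Int} :
    z ∈ bfsSeeds m2 ↔
      0 ≤ z.1 ∧ z.1 < (m2.length : Int) ∧ 0 ≤ z.2 ∧ z.2 < (((m2.headD []).length : Nat) : Int) ∧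
        pvGet2 m2 z.1 z.2 = 255 := by
  simp only [bfsSeeds, List.mem_flatMap, List.mem_filterMap, List.mem_range]
  constructor
  · rintro ⟨i, hi, j, hj, hif⟩
    split at hif
    · rename_i hcond
      obtain ⟨rfl⟩ := Option.some_inj.1 hif
      dsimp only
      exact ⟨by positivity, by exact_mod_cast hi, by positivity, by exact_mod_cast hj, hcond⟩
    · exact absurd hif (by simp)
  · rintro ⟨h1, h2, h3, h4, h5⟩
    refine ⟨z.1.toNat, by omega, z.2.toNat, by omega, ?_⟩
    have e1 : ((z.1.toNat : Nat) : Int) = z.1 := Int.toNat_of_nonneg h1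
    have e2 : ((z.2.toNat : Nat) : Int) = z.2 := Int.toNat_of_nonneg h3
    rw [e1, e2, if_pos h5]

lemma cellFold_spec {R C : Nat} (ds : List (Int × Int)) (top : Int × Int) (hnd : ds.Nodup) :
    ∀ (m v : List (List Int)) (q : List (Int × Int)), m.length = R → ShapeOf R C v →
    (ds.foldl (bfsStep top) (m, v, q)).1 = m ∧
    Sh (ds.foldl (bfsStep top) (m, v, q)).2.1 v ∧
    (∀ a b : Int, 0 ≤ a → 0 ≤ b →
      pvGet2 (ds.foldl (bfsStep top) (m, v, q)).2.1 a b =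
        if (∃ d ∈ ds, a = top.1 + d.1 ∧ b = top.2 + d.2) ∧ stepCondB R C v (a, b) = true then 255
        else pvGet2 v a b) ∧
    (ds.foldl (bfsStep top) (m, v, q)).2.2 =
      q ++ ds.filterMap (fun d =>
        if stepCondB R C v (top.1 + d.1, top.2 + d.2) = true then
          some (top.1 + d.1, top.2 + d.2) else none) := by
  induction ds with
  | nil =>
    intro m v q hm hv
    refine ⟨rfl, sh_refl v, ?_, by simp⟩
    intro a b _ _
    rw [if_neg]
    · rfl
    · rintro ⟨⟨d, hd, -⟩, -⟩
      exact absurd hd (by simp)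
  | cons d ds ih =>
    intro m v q hm hv
    have hnd' : ds.Nodup := (List.nodup_cons.1 hnd).2
    have hstep : List.foldl (bfsStep top) (m, v, q) (d :: ds) =
        List.foldl (bfsStep top) (bfsStep top (m, v, q) d) ds := rfl
    by_cases g : stepCondB R C v (top.1 + d.1, top.2 + d.2) = true
    · obtain ⟨g1, g2, g3, g4, g5⟩ := (stepCondB_iff ..).1 g
      have hbs : bfsStep top (m, v, q) d =
          (m, pvSet2 v (top.1 + d.1) (top.2 + d.2) 255, q ++ [(top.1 + d.1, top.2 + d.2)]) := by
        simp only [bfsStep]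
        rw [if_pos ⟨g1, by rw [hm]; exact g2, g3, by rw [hv.2.1]; exact g4, g5⟩]
      have hv1 : ShapeOf R C (pvSet2 v (top.1 + d.1) (top.2 + d.2) 255) :=
        shapeOf_of_sh (sh_pvSet2 ..) hv
      obtain ⟨c1, c2, c3, c4⟩ :=
        ih hnd' m (pvSet2 v (top.1 + d.1) (top.2 + d.2) 255)
          (q ++ [(top.1 + d.1, top.2 + d.2)]) hm hv1
      have hdist : ∀ d' ∈ ds, ¬(top.1 + d'.1 = top.1 + d.1 ∧ top.2 + d'.2 = top.2 + d.2) := by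
        rintro d' hd' ⟨e1, e2⟩
        have : d' = d := Prod.ext (by omega) (by omega)
        exact (List.nodup_cons.1 hnd).1 (this ▸ hd')
      rw [hstep, hbs]
      refine ⟨c1, sh_trans c2 (sh_pvSet2 ..), ?_, ?_⟩
      · intro a b ha hb'
        rw [c3 a b ha hb']
        have hval : pvGet2 (pvSet2 v (top.1 + d.1) (top.2 + d.2) 255) a b =
            if a = top.1 + d.1 ∧ b = top.2 + d.2 then 255 else pvGet2 v a b :=
          pvGet2_pvSet2 hv g1 g2 g3 g4 a b ha hb'
        by_cases hat : a = top.1 + d.1 ∧ b = top.2 + d.2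
        · have hLHS : ¬((∃ d' ∈ ds, a = top.1 + d'.1 ∧ b = top.2 + d'.2) ∧
              stepCondB R C (pvSet2 v (top.1 + d.1) (top.2 + d.2) 255) (a, b) = true) := by
            rintro ⟨⟨d', hd', e1, e2⟩, -⟩
            exact hdist d' hd' ⟨by omega, by omega⟩
          rw [if_neg hLHS, hval, if_pos hat]
          have hab : ((a, b) : Int × Int) = (top.1 + d.1, top.2 + d.2) :=
            Prod.ext hat.1 hat.2
          rw [if_pos ⟨⟨d, List.mem_cons_self .., hat.1, hat.2⟩, by rw [hab]; exact g⟩]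
        · have hvv : pvGet2 (pvSet2 v (top.1 + d.1) (top.2 + d.2) 255) a b = pvGet2 v a b := by
            rw [hval, if_neg hat]
          have hsc : stepCondB R C (pvSet2 v (top.1 + d.1) (top.2 + d.2) 255) (a, b) =
              stepCondB R C v (a, b) := by
            simp [stepCondB, hvv]
          rw [hsc, hvv]
          refine if_congr ?_ rfl rfl
          constructor
          · rintro ⟨⟨d', hd', e⟩, hsc'⟩
            exact ⟨⟨d', List.mem_cons_of_mem _ hd', e⟩, hsc'⟩
          · rintro ⟨⟨d', hd', e1, e2⟩, hsc'⟩
            rcases List.mem_cons.1 hd' with rfl | hd''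
            · exact absurd ⟨e1, e2⟩ hat
            · exact ⟨⟨d', hd'', e1, e2⟩, hsc'⟩
      · rw [c4]
        have hcongr : ds.filterMap (fun d' =>
              if stepCondB R C (pvSet2 v (top.1 + d.1) (top.2 + d.2) 255)
                  (top.1 + d'.1, top.2 + d'.2) = true then
                some (top.1 + d'.1, top.2 + d'.2) else none) =
            ds.filterMap (fun d' =>
              if stepCondB R C v (top.1 + d'.1, top.2 + d'.2) = true then
                some (top.1 + d'.1, top.2 + d'.2) else none) := by
          apply List.filterMap_congr
          intro d' hd'
          by_cases hnn : 0 ≤ top.1 + d'.1 ∧ 0 ≤ top.2 + d'.2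
          · have hvv : pvGet2 (pvSet2 v (top.1 + d.1) (top.2 + d.2) 255)
                (top.1 + d'.1) (top.2 + d'.2) = pvGet2 v (top.1 + d'.1) (top.2 + d'.2) := by
              rw [pvGet2_pvSet2 hv g1 g2 g3 g4 _ _ hnn.1 hnn.2, if_neg (hdist d' hd')]
            simp [stepCondB, hvv]
          · have h1 : stepCondB R C (pvSet2 v (top.1 + d.1) (top.2 + d.2) 255)
                (top.1 + d'.1, top.2 + d'.2) = false := by
              rw [Bool.eq_false_iff]
              intro hc
              obtain ⟨e1, -, e2, -⟩ := (stepCondB_iff ..).1 hc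
              exact hnn ⟨e1, e2⟩
            have h2 : stepCondB R C v (top.1 + d'.1, top.2 + d'.2) = false := by
              rw [Bool.eq_false_iff]
              intro hc
              obtain ⟨e1, -, e2, -⟩ := (stepCondB_iff ..).1 hc
              exact hnn ⟨e1, e2⟩
            rw [h1, h2]
        rw [hcongr, List.filterMap_cons, if_pos g, List.append_assoc]
        rfl
    · have hbs : bfsStep top (m, v, q) d = (m, v, q) := by
        simp only [bfsStep]
        rw [if_neg]
        rintro ⟨h1, h2, h3, h4, h5⟩
        exact g ((stepCondB_iff ..).2
          ⟨h1, by rw [← hm]; exact h2, h3, by rw [← hv.2.1]; exact h4, h5⟩)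
      obtain ⟨c1, c2, c3, c4⟩ := ih hnd' m v q hm hv
      rw [hstep, hbs]
      refine ⟨c1, c2, ?_, ?_⟩
      · intro a b ha hb'
        rw [c3 a b ha hb']
        refine if_congr ?_ rfl rfl
        constructor
        · rintro ⟨⟨d', hd', e⟩, hsc'⟩
          exact ⟨⟨d', List.mem_cons_of_mem _ hd', e⟩, hsc'⟩
        · rintro ⟨⟨d', hd', e1, e2⟩, hsc'⟩
          rcases List.mem_cons.1 hd' with rfl | hd''
          · exact absurd (by rw [← e1, ← e2]; exact hsc') g
          · exact ⟨⟨d', hd'', e1, e2⟩, hsc'⟩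
      · rw [c4, List.filterMap_cons, if_neg g]

lemma level_spec {R C : Nat} (front : List (Int × Int)) :
    ∀ (back : List (Int × Int)) (m v : List (List Int)), m.length = R → ShapeOf R C v →
    ∃ M v' P, bfsLevel m v (front ++ back) front.length = (M, v', back ++ P) ∧
      M.length = m.length ∧ Sh v' v ∧
      (∀ a b : Int, 0 ≤ a → 0 ≤ b →
        pvGet2 v' a b = if (adjQB front a b && stepCondB R C v (a, b)) then 255 else pvGet2 v a b) ∧
      (∀ z : Int × Int, z ∈ P ↔ AdjQ front z.1 z.2 ∧ stepCondB R C v z = true) := by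
  induction front with
  | nil =>
    intro back m v hm hv
    refine ⟨m, v, [], by simp [bfsLevel], rfl, sh_refl v, ?_, by simp [AdjQ]⟩
    intro a b _ _
    have : adjQB [] a b = false := rfl
    rw [this]
    simp
  | cons p front ih =>
    intro back m v hm hv
    obtain ⟨c1, c2, c3, c4⟩ :=
      cellFold_spec dirsA p dirs_nodup (pvSet2 m p.1 p.2 255) v (front ++ back)
        (by rw [length_pvSet2]; exact hm) hv
    set s := bfsCell m v (front ++ back) p with hs
    set pushP := dirsA.filterMap (fun d =>
      if stepCondB R C v (p.1 + d.1, p.2 + d.2) = true then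
        some (p.1 + d.1, p.2 + d.2) else none) with hpushP
    have hq : s.2.2 = front ++ (back ++ pushP) := by
      rw [hs, bfsCell, c4, List.append_assoc]
    have hm' : s.1.length = R := by rw [hs, bfsCell, c1, length_pvSet2]; exact hm
    have hv' : ShapeOf R C s.2.1 := shapeOf_of_sh (by rw [hs, bfsCell]; exact c2) hv
    obtain ⟨M, v', P', hrun, hMl, hsh, hval, hmem⟩ := ih (back ++ pushP) s.1 s.2.1 hm' hv'
    have hvc : ∀ a b : Int, 0 ≤ a → 0 ≤ b →
        pvGet2 s.2.1 a b =
          if (∃ d ∈ dirsA, a = p.1 + d.1 ∧ b = p.2 + d.2) ∧ stepCondB R C v (a, b) = true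
          then 255 else pvGet2 v a b := by
      intro a b ha hb
      rw [hs, bfsCell]
      exact c3 a b ha hb
    refine ⟨M, v', pushP ++ P', ?_, ?_, ?_, ?_, ?_⟩
    · show bfsLevel m v (p :: (front ++ back)) (front.length + 1) = (M, v', back ++ (pushP ++ P'))
      have hunf : bfsLevel m v (p :: (front ++ back)) (front.length + 1) =
          bfsLevel s.1 s.2.1 s.2.2 front.length := rfl
      rw [hunf, hq, hrun, List.append_assoc]
    · rw [hMl, hs, bfsCell, c1, length_pvSet2]
    · exact sh_trans hsh (by rw [hs, bfsCell]; exact c2)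
    · intro a b ha hb
      rw [hval a b ha hb]
      by_cases hp : (∃ d ∈ dirsA, a = p.1 + d.1 ∧ b = p.2 + d.2) ∧ stepCondB R C v (a, b) = true
      · have hv255 : pvGet2 s.2.1 a b = 255 := by rw [hvc a b ha hb, if_pos hp]
        have hscf : stepCondB R C s.2.1 (a, b) = false := by
          rw [Bool.eq_false_iff]
          intro hc
          obtain ⟨-, -, -, -, h0⟩ := (stepCondB_iff ..).1 hc
          rw [hv255] at h0
          exact absurd h0 (by norm_num)
        have hadj : adjQB (p :: front) a b = true := by
          rw [adjQB_iff]
          obtain ⟨⟨d, hd, e1, e2⟩, -⟩ := hp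
          exact ⟨p, List.mem_cons_self .., d, hd, e1, e2⟩
        rw [hscf, hadj, hv255, hp.2]
        simp
      · have hvv : pvGet2 s.2.1 a b = pvGet2 v a b := by rw [hvc a b ha hb, if_neg hp]
        have hsc : stepCondB R C s.2.1 (a, b) = stepCondB R C v (a, b) := by
          simp [stepCondB, hvv]
        rw [hsc, hvv]
        by_cases hscv : stepCondB R C v (a, b) = true
        · have hnp : ¬∃ d ∈ dirsA, a = p.1 + d.1 ∧ b = p.2 + d.2 := fun h => hp ⟨h, hscv⟩
          have hpp : (dirsA.any fun d => a == p.1 + d.1 && b == p.2 + d.2) = false := by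
            rw [Bool.eq_false_iff]
            intro hc
            obtain ⟨d, hd, he⟩ := List.any_eq_true.1 hc
            rw [Bool.and_eq_true, beq_iff_eq, beq_iff_eq] at he
            exact hnp ⟨d, hd, he.1, he.2⟩
          have : adjQB (p :: front) a b = adjQB front a b := by
            simp [adjQB, List.any_cons, hpp]
          rw [this]
        · have hscf : stepCondB R C v (a, b) = false := by
            rw [Bool.eq_false_iff]; exact hscv
          rw [hscf]
          simp
    · intro z
      rw [List.mem_append, hmem z]
      have hpush : z ∈ pushP ↔
          (∃ d ∈ dirsA, z.1 = p.1 + d.1 ∧ z.2 = p.2 + d.2) ∧ stepCondB R C v z = true := by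
        rw [hpushP]
        simp only [List.mem_filterMap]
        constructor
        · rintro ⟨d, hd, hif⟩
          split at hif
          · rename_i hcond
            obtain ⟨rfl⟩ := Option.some_inj.1 hif
            exact ⟨⟨d, hd, rfl, rfl⟩, hcond⟩
          · exact absurd hif (by simp)
        · rintro ⟨⟨d, hd, e1, e2⟩, hsc⟩
          refine ⟨d, hd, ?_⟩
          rw [if_pos (by rw [← e1, ← e2]; exact hsc)]
          rw [← e1, ← e2]
      have hAdjCons : AdjQ (p :: front) z.1 z.2 ↔
          (∃ d ∈ dirsA, z.1 = p.1 + d.1 ∧ z.2 = p.2 + d.2) ∨ AdjQ front z.1 z.2 := by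
        constructor
        · rintro ⟨p', hp', d, hd, e1, e2⟩
          rcases List.mem_cons.1 hp' with rfl | hp''
          · exact Or.inl ⟨d, hd, e1, e2⟩
          · exact Or.inr ⟨p', hp'', d, hd, e1, e2⟩
        · rintro (⟨d, hd, e1, e2⟩ | ⟨p', hp', d, hd, e1, e2⟩)
          · exact ⟨p, List.mem_cons_self .., d, hd, e1, e2⟩
          · exact ⟨p', List.mem_cons_of_mem _ hp', d, hd, e1, e2⟩
      by_cases hz : (∃ d ∈ dirsA, z.1 = p.1 + d.1 ∧ z.2 = p.2 + d.2) ∧ stepCondB R C v z = true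
      · constructor
        · intro
          exact ⟨hAdjCons.2 (Or.inl hz.1), hz.2⟩
        · intro
          exact Or.inl (hpush.2 hz)
      · by_cases hnn : 0 ≤ z.1 ∧ 0 ≤ z.2
        · have hvv : pvGet2 s.2.1 z.1 z.2 = pvGet2 v z.1 z.2 := by
            rw [hvc z.1 z.2 hnn.1 hnn.2]
            rw [if_neg (by rintro ⟨h1, h2⟩; exact hz ⟨h1, by rwa [Prod.mk.eta] at h2⟩)]
          have hsc : stepCondB R C s.2.1 z = stepCondB R C v z := by
            rw [show z = (z.1, z.2) from (Prod.mk.eta).symm]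
            simp [stepCondB, hvv]
          rw [hpush, hsc, hAdjCons]
          constructor
          · rintro (⟨h1, h2⟩ | ⟨h1, h2⟩)
            · exact absurd ⟨h1, h2⟩ hz
            · exact ⟨Or.inr h1, h2⟩
          · rintro ⟨h1 | h1, h2⟩
            · exact absurd ⟨h1, h2⟩ hz
            · exact Or.inr ⟨h1, h2⟩
        · have hscf : ∀ w, stepCondB R C w z = false := by
            intro w
            rw [Bool.eq_false_iff]
            intro hc
            obtain ⟨e1, -, e2, -⟩ := (stepCondB_iff ..).1 hc
            exact hnn ⟨e1, e2⟩
          rw [hpush, hscf, hscf]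
          simp

lemma bfsRound_eq {R C : Nat} {m v : List (List Int)} {q : List (Int × Int)}
    (hm : m.length = R) (hv : ShapeOf R C v) (hinv : InvQ R C v q) :
    ∃ M q', bfsLevel m v q q.length = (M, passF R C v, q') ∧ M.length = m.length ∧
      Sh (passF R C v) v ∧ InvQ R C (passF R C v) q' := by
  obtain ⟨M, v', P, hrun, hMl, hsh, hval, hmem⟩ := level_spec q [] m v hm hv
  rw [List.append_nil] at hrun
  rw [List.nil_append] at hrun
  have hcond : ∀ a b : Int, 0 ≤ a → 0 ≤ b →
      (((a, b) : Int × Int) ∈ passAdds v R C ↔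
        (adjQB q a b && stepCondB R C v (a, b)) = true) := by
    intro a b ha hb
    rw [Bool.and_eq_true, adjQB_iff, stepCondB_iff, mem_passAdds]
    dsimp only
    constructor
    · rintro ⟨h1, h2, h3, h4, h5, hex⟩
      exact ⟨hinv.2 a b h1 h2 h3 h4 h5 hex, h1, h2, h3, h4, h5⟩
    · rintro ⟨⟨p', hp', d, hd, e1, e2⟩, h1, h2, h3, h4, h5⟩
      obtain ⟨b1, b2, b3, b4, b5⟩ := hinv.1 p' hp'
      refine ⟨h1, h2, h3, h4, h5, (-d.1, -d.2), dirs_neg d hd, ?_, ?_, ?_, ?_, ?_⟩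
      all_goals dsimp only
      · omega
      · omega
      · omega
      · omega
      · have e3 : a + -d.1 = p'.1 := by omega
        have e4 : b + -d.2 = p'.2 := by omega
        rw [e3, e4]
        exact b5
  have hbounds : ∀ z ∈ passAdds v R C,
      0 ≤ z.1 ∧ z.1 < (R : Int) ∧ 0 ≤ z.2 ∧ z.2 < (C : Int) := by
    intro z hz
    obtain ⟨h1, h2, h3, h4, -⟩ := mem_passAdds.1 hz
    exact ⟨h1, h2, h3, h4⟩
  have hpassval : ∀ a b : Int, 0 ≤ a → 0 ≤ b →
      pvGet2 (applyAdds v (passAdds v R C)) a b =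
        if ((a, b) : Int × Int) ∈ passAdds v R C then 255 else pvGet2 v a b :=
    fun a b ha hb => pvGet2_applyAdds _ hv hbounds a b ha hb
  have hveq : v' = passF R C v := by
    apply grid_ext (sh_trans hsh (sh_symm (sh_applyAdds _ v)))
    intro a b
    rw [hval a b (by positivity) (by positivity), hpassval a b (by positivity) (by positivity)]
    by_cases hc : (adjQB q (a : Int) (b : Int) && stepCondB R C v ((a : Int), (b : Int))) = true
    · rw [if_pos hc, if_pos ((hcond (a : Int) (b : Int) (by positivity) (by positivity)).2 hc)]
    · rw [if_neg hc,
        if_neg (fun hm' => hc ((hcond (a : Int) (b : Int) (by positivity) (by positivity)).1 hm'))]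
  have hinv' : InvQ R C (passF R C v) P := by
    rw [← hveq]
    constructor
    · intro z hz
      obtain ⟨hAdj, hsc⟩ := (hmem z).1 hz
      obtain ⟨h1, h2, h3, h4, h5⟩ := (stepCondB_iff ..).1 hsc
      refine ⟨h1, h2, h3, h4, ?_⟩
      rw [hval z.1 z.2 h1 h3, if_pos]
      rw [Bool.and_eq_true, adjQB_iff]
      refine ⟨hAdj, ?_⟩
      rw [show ((z.1, z.2) : Int × Int) = z from Prod.mk.eta]
      exact hsc
    · intro a b ha hlta hb0 hltb h0 hex
      rw [hval a b ha hb0] at h0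
      have hnc : ¬(adjQB q a b && stepCondB R C v (a, b)) = true := by
        intro hc
        rw [if_pos hc] at h0
        norm_num at h0
      rw [if_neg hnc] at h0
      have hscv : stepCondB R C v (a, b) = true :=
        (stepCondB_iff ..).2 ⟨ha, hlta, hb0, hltb, h0⟩
      have hnadj : ¬AdjQ q a b := fun hadj =>
        hnc (by rw [Bool.and_eq_true, adjQB_iff]; exact ⟨hadj, hscv⟩)
      obtain ⟨d, hd, n1, n2, n3, n4, n5⟩ := hex
      rw [hval _ _ n1 n3] at n5
      by_cases hc2 : (adjQB q (a + d.1) (b + d.2) && stepCondB R C v (a + d.1, b + d.2)) = true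
      · have hw : ((a + d.1, b + d.2) : Int × Int) ∈ P := by
          rw [hmem]
          rw [Bool.and_eq_true, adjQB_iff] at hc2
          exact ⟨hc2.1, hc2.2⟩
        exact ⟨(a + d.1, b + d.2), hw, (-d.1, -d.2), dirs_neg d hd, by dsimp; ring, by dsimp; ring⟩
      · rw [if_neg hc2] at n5
        exact absurd (hinv.2 a b ha hlta hb0 hltb h0 ⟨d, hd, n1, n2, n3, n4, n5⟩) hnadj
  exact ⟨M, P, by rw [← hveq]; exact hrun, hMl, sh_applyAdds _ v, hinv'⟩

lemma rounds_eq {R C : Nat} : ∀ (T : Nat) (m v : List (List Int)) (q : List (Int × Int)),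
    m.length = R → ShapeOf R C v → InvQ R C v q →
    (bfsRounds m v q T).2.1 = (passF R C)^[T] v := by
  intro T
  induction T with
  | zero => intro m v q _ _ _; rfl
  | succ T ih =>
    intro m v q hm hv hinv
    obtain ⟨M, q', hrun, hMl, hshp, hinv'⟩ := bfsRound_eq hm hv hinv
    have hunf : bfsRounds m v q (T + 1) = bfsRounds M (passF R C v) q' T := by
      show bfsRounds (bfsLevel m v q q.length).1 (bfsLevel m v q q.length).2.1
        (bfsLevel m v q q.length).2.2 T = _
      rw [hrun]
    rw [hunf, ih M (passF R C v) q' (by rw [hMl]; exact hm) (shapeOf_of_sh hshp hv) hinv',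
      ← Function.iterate_succ_apply]

lemma rounds_nil : ∀ (T : Nat) (m v : List (List Int)), (bfsRounds m v [] T).2.1 = v := by
  intro T
  induction T with
  | zero => intro m v; rfl
  | succ T ih => intro m v; exact ih m v

lemma passLoop_eq (R C : Nat) : ∀ (T : Nat) (v : List (List Int)),
    passLoop v R C T = (passF R C)^[T] v := by
  intro T
  induction T with
  | zero => intro v; rfl
  | succ T ih =>
    intro v
    by_cases h : passAdds v R C = []
    · have hfix : passF R C v = v := by simp [passF, h, applyAdds]
      simp only [passLoop, h, if_pos rfl]
      rw [Function.iterate_fixed hfix]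
      simp [applyAdds, h]
    · simp only [passLoop, if_neg h]
      rw [ih, Function.iterate_succ_apply]
      rfl

-- ===== VERDICT (by name: the statement is the Claim_ definition above) =====
theorem bfs_spec : Claim_equal_bfs := by
  intro matrix matrix2 buffer _ hpre
  show bfs matrix matrix2 buffer = bfs_alt matrix matrix2 buffer
  unfold bfs bfs_alt
  by_cases hb : buffer ≤ 0 ∨ matrix2 = []
  · rw [if_pos hb]
    rcases hb with hb | hb
    · have h0 : buffer.toNat = 0 := by omega
      rw [h0]
      rfl
    · subst hb
      have hseeds : bfsSeeds [] = [] := rfl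
      rw [hseeds, rounds_nil]
  · rw [if_neg hb]
    push_neg at hb
    obtain ⟨hb1, hb2⟩ := hb
    rcases hpre with h | ⟨hrows, hcase⟩
    · exact absurd h hb2
    rcases hcase with h | h | ⟨hml, hmr⟩
    · omega
    · -- no seed exists: A never pops anything; B's first pass adds nothing
      have hval0 : ∀ x y : Int, 0 ≤ x → x < (matrix2.length : Int) → 0 ≤ y →
          y < ((matrix2.headD []).length : Int) → pvGet2 matrix2 x y ≠ 255 := by
        intro x y h1 h2 h3 h4
        have hxl : x.toNat < matrix2.length := by omega
        have hrm : matrix2.getD x.toNat [] ∈ matrix2 := by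
          rw [List.getD_eq_getElem _ _ hxl]
          exact List.getElem_mem hxl
        have := h _ hrm y.toNat (by omega)
        simpa [pvGet2] using this
      have hseeds : bfsSeeds matrix2 = [] := by
        rw [List.eq_nil_iff_forall_not_mem]
        intro z hz
        obtain ⟨h1, h2, h3, h4, h5⟩ := mem_seeds.1 hz
        exact hval0 z.1 z.2 h1 h2 h3 h4 h5
      have hadds : passAdds matrix2 matrix2.length (matrix2.headD []).length = [] := by
        rw [List.eq_nil_iff_forall_not_mem]
        intro z hz
        obtain ⟨-, -, -, -, -, d, hd, n1, n2, n3, n4, n5⟩ := mem_passAdds.1 hz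
        exact hval0 _ _ n1 n2 n3 n4 n5
      have hfix : passF matrix2.length (matrix2.headD []).length matrix2 = matrix2 := by
        show applyAdds matrix2 (passAdds matrix2 matrix2.length (matrix2.headD []).length) =
          matrix2
        rw [hadds]
        rfl
      rw [hseeds, rounds_nil, passLoop_eq, Function.iterate_fixed hfix]
    · -- the main case: seeds may exist; run the layered simulation
      have hshape : ShapeOf matrix2.length (matrix2.headD []).length matrix2 := ⟨rfl, rfl, hrows⟩
      have hinv : InvQ matrix2.length (matrix2.headD []).length matrix2 (bfsSeeds matrix2) := by
        constructor
        · intro p hp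
          exact mem_seeds.1 hp
        · intro a b ha hlta hb0 hltb h0 hex
          obtain ⟨d, hd, n1, n2, n3, n4, n5⟩ := hex
          refine ⟨(a + d.1, b + d.2), mem_seeds.2 ⟨n1, n2, n3, n4, n5⟩,
            (-d.1, -d.2), dirs_neg d hd, by dsimp; ring, by dsimp; ring⟩
      rw [rounds_eq buffer.toNat matrix matrix2 (bfsSeeds matrix2) hml hshape hinv, passLoop_eq]
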